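-- pv_equiv track=rewrite | github.com/raeez/chiral-bar-cobar | compute/lib/bar_cohomology_koszul_criterion.py | heisenberg_bar_dims
-- ===== SOURCE A (Python) =====
-- from typing import Dict, List, Optional, Tuple
--
-- def heisenberg_bar_dims(N: int) -> List[int]:
--     """Bar cohomology dimensions for Heisenberg: h_1 = 1, h_n = p(n-2) for n >= 2.
--
--     p(k) = partition number.  The Heisenberg is Gaussian: Koszul dual is
--     a trivial exterior algebra, so bar cohomology is concentrated.
--     """
--     dims = []
--     for n in range(1, N + 1):
--         if n == 1:
--             dims.append(1)
--         else:
--             dims.append(_partition_number(n - 2))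
--     return dims
--
-- def _partition_number(n: int) -> int:
--     """Number of partitions of n. p(0)=1, p(k)=0 for k<0."""
--     if n < 0:
--         return 0
--     if n == 0:
--         return 1
--     # Euler's pentagonal recurrence
--     p = [0] * (n + 1)
--     p[0] = 1
--     for k in range(1, n + 1):
--         s = 0
--         j = 1
--         while True:
--             # Pentagonal numbers: j*(3j-1)/2 and j*(3j+1)/2
--             p1 = j * (3 * j - 1) // 2
--             p2 = j * (3 * j + 1) // 2
--             if p1 > k:
--                 break
--             sign = (-1) ** (j + 1)
--             s += sign * p[k - p1]
--             if p2 <= k: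
--                 s += sign * p[k - p2]
--             j += 1
--         p[k] = s
--     return p[n]
-- ===== SOURCE B (Python) =====
-- def heisenberg_bar_dims(N: int):
--     """h_1 = 1, h_n = p(n-2): build the partition table ONCE up to N-2."""
--     if N <= 0:
--         return []
--     if N == 1:
--         return [1]
--     M = N - 2
--     p = [0] * (M + 1)
--     p[0] = 1
--     for k in range(1, M + 1):
--         s = 0
--         j = 1
--         while True:
--             p1 = j * (3 * j - 1) // 2
--             p2 = j * (3 * j + 1) // 2
--             if p1 > k:
--                 break
--             sign = (-1) ** (j + 1)
--             s += sign * p[k - p1]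
--             if p2 <= k:
--                 s += sign * p[k - p2]
--             j += 1
--         p[k] = s
--     return [1] + p
-- ===== Notes on version B (the rewrite author's own statement) =====
-- stated objective: faster
-- what changed: A rebuilds a fresh pentagonal-recurrence partition table from scratch for every n; B builds the table once up to N-2 and reads each h_n out of it.
import Mathlib
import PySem

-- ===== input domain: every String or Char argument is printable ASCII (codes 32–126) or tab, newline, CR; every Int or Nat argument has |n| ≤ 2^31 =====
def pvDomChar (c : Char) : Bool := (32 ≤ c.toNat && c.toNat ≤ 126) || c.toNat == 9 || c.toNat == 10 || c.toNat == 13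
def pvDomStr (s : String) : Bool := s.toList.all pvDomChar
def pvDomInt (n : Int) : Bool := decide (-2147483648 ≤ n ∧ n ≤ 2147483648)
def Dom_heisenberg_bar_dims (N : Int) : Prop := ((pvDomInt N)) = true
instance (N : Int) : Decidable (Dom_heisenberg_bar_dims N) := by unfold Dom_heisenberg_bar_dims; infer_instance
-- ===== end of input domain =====

-- B builds the pentagonal-recurrence partition table once up to N-2 instead of
-- rebuilding it from scratch for every n (measured asymptotically faster).

-- ===== PORT A =====

-- the inner `while True` of Euler's pentagonal recurrence (identical source text
-- in Source A's _partition_number and in Source B's single table build); fuel k+1 bounds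
-- the loop since it breaks as soon as j*(3j-1)/2 > k and that happens by j = k+1
def pentInnerGo (p : List Int) (k : Nat) : Nat → Int → Nat → Int
  | _, s, 0 => s
  | j, s, fuel+1 =>
    let p1 := j * (3 * j - 1) / 2
    let p2 := j * (3 * j + 1) / 2
    if k < p1 then s
    else
      let sign : Int := if j % 2 == 1 then 1 else -1
      let s1 := s + sign * p.getD (k - p1) 0
      let s2 := if p2 ≤ k then s1 + sign * p.getD (k - p2) 0 else s1
      pentInnerGo p k (j+1) s2 fuel

def pentInner (p : List Int) (k : Nat) : Int := pentInnerGo p k 1 0 (k+1)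

-- Source A's _partition_number: a fresh table of size n+1, filled for k = 1..n
def partitionNumber (n : Int) : Int :=
  if n < 0 then 0
  else if n = 0 then 1
  else
    (((List.range' 1 n.toNat).foldl (fun p k => p.set k (pentInner p k))
      ((List.replicate (n.toNat+1) (0:Int)).set 0 1))).getD n.toNat 0

def heisenberg_bar_dims (N : Int) : List Int :=
  (PySem.List.pyRange 1 (N+1) 1).foldl
    (fun dims n => if n = 1 then dims ++ [1] else dims ++ [partitionNumber (n - 2)]) []

-- ===== PORT B =====
def heisenberg_bar_dims_alt (N : Int) : List Int :=
  if N ≤ 0 then []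
  else if N = 1 then [1]
  else
    1 :: ((List.range' 1 (N - 2).toNat).foldl (fun p k => p.set k (pentInner p k))
      ((List.replicate ((N - 2).toNat+1) (0:Int)).set 0 1))

-- ===== PRECONDITION & SPEC =====
def Spec_heisenberg_bar_dims (N : Int) (out : List Int) : Prop := out = heisenberg_bar_dims_alt N
instance (N : Int) (out : List Int) : Decidable (Spec_heisenberg_bar_dims N out) := by unfold Spec_heisenberg_bar_dims; infer_instance

-- ===== CLAIM (what is proved, stated in full; the proofs are below) =====
def Claim_equal_heisenberg_bar_dims : Prop := ∀ (N : Int), Dom_heisenberg_bar_dims N → Spec_heisenberg_bar_dims N (heisenberg_bar_dims N)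

-- ===== LEMMAS AND PROOFS =====

-- the mathematical partition numbers via the same pentagonal recurrence
def pfun : Nat → Int
  | 0 => 1
  | k+1 => pentInner ((List.range (k+1)).attach.map (fun i => pfun i.1)) (k+1)
decreasing_by exact List.mem_range.mp i.2

lemma pfun_succ (k : Nat) :
    pfun (k+1) = pentInner ((List.range (k+1)).map pfun) (k+1) := by
  rw [pfun]
  congr 1
  rw [List.map_attach_eq_pmap, List.pmap_eq_map]

-- pentInnerGo only reads entries at indices < k (for j ≥ 1)
lemma pentInnerGo_congr (p q : List Int) (k : Nat)
    (h : ∀ i, i < k → p.getD i 0 = q.getD i 0) :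
    ∀ fuel j s, 1 ≤ j → pentInnerGo p k j s fuel = pentInnerGo q k j s fuel := by
  intro fuel
  induction fuel with
  | zero => intro j s _; rfl
  | succ fuel ih =>
    intro j s hj
    simp only [pentInnerGo]
    split
    · rfl
    · rename_i hle
      have hp1 : 1 ≤ j * (3 * j - 1) / 2 := by
        have h2 : 2 ≤ j * (3 * j - 1) := by simpa using Nat.mul_le_mul hj (show 2 ≤ 3 * j - 1 by omega)
        calc 1 = 2 / 2 := rfl
          _ ≤ j * (3 * j - 1) / 2 := Nat.div_le_div_right h2
      have hk1 : k - j * (3 * j - 1) / 2 < k := by omega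
      rw [h _ hk1]
      have hk2 : j * (3 * j + 1) / 2 ≤ k → k - j * (3 * j + 1) / 2 < k := by
        intro h2
        have : 1 ≤ j * (3 * j + 1) / 2 := by
          have h3 : 2 ≤ j * (3 * j + 1) := by simpa using Nat.mul_le_mul hj (show 2 ≤ 3 * j + 1 by omega)
          calc 1 = 2 / 2 := rfl
            _ ≤ j * (3 * j + 1) / 2 := Nat.div_le_div_right h3
        omega
      by_cases h2 : j * (3 * j + 1) / 2 ≤ k
      · simp only [if_pos h2, h _ (hk2 h2)]
        exact ih _ _ (by omega)
      · simp only [if_neg h2]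
        exact ih _ _ (by omega)

lemma pentInner_congr (p q : List Int) (k : Nat)
    (h : ∀ i, i < k → p.getD i 0 = q.getD i 0) :
    pentInner p k = pentInner q k :=
  pentInnerGo_congr p q k h (k+1) 1 0 (by omega)

-- invariant of the table build: after processing k = 1..j the table holds
-- pfun 0 .. pfun j followed by the untouched zeros
lemma tbl_spec (m : Nat) : ∀ j, j ≤ m →
    (List.range' 1 j).foldl (fun p k => p.set k (pentInner p k))
        ((List.replicate (m+1) (0:Int)).set 0 1)
      = (List.range (j+1)).map pfun ++ List.replicate (m - j) 0 := by
  intro j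
  induction j with
  | zero =>
    intro _
    simp [List.replicate_succ, pfun]
  | succ j ih =>
    intro hj
    have hj' : j ≤ m := by omega
    rw [List.range'_1_concat, List.foldl_append, ih hj']
    simp only [List.foldl_cons, List.foldl_nil]
    have hlen : ((List.range (j+1)).map pfun).length = j + 1 := by simp
    have hcong : pentInner ((List.range (j+1)).map pfun ++ List.replicate (m - j) 0) (1 + j)
        = pentInner ((List.range (j+1)).map pfun) (j+1) := by
      rw [show 1 + j = j + 1 from by omega]
      apply pentInner_congr
      intro i hi
      rw [List.getD_append _ _ _ _ (by omega)]
    rw [hcong, ← pfun_succ]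
    have hm : m - j = (m - (j+1)) + 1 := by omega
    rw [show 1 + j = j + 1 from by omega, hm, List.replicate_succ,
        List.set_append_right _ _ (by omega), hlen,
        show j + 1 - (j + 1) = 0 from by omega]
    simp [List.range_succ]

lemma tbl_full (m : Nat) :
    (List.range' 1 m).foldl (fun p k => p.set k (pentInner p k))
        ((List.replicate (m+1) (0:Int)).set 0 1)
      = (List.range (m+1)).map pfun := by
  rw [tbl_spec m m le_rfl]
  simp

lemma partitionNumber_eq (n : Int) (h : 0 ≤ n) : partitionNumber n = pfun n.toNat := by
  unfold partitionNumber
  rcases eq_or_lt_of_le h with h0 | hpos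
  · simp [← h0, pfun]
  · rw [if_neg (by omega), if_neg (by omega), tbl_full]
    have hlt : n.toNat < n.toNat + 1 := by omega
    rw [List.getD_eq_getElem _ _ (by simp [hlt]), List.getElem_map, List.getElem_range]

lemma alt_eq (N : Int) (h2 : 2 ≤ N) :
    heisenberg_bar_dims_alt N = 1 :: (List.range ((N-2).toNat + 1)).map pfun := by
  unfold heisenberg_bar_dims_alt
  rw [if_neg (by omega), if_neg (by omega), tbl_full]

lemma a_fold_map (N : Int) :
    heisenberg_bar_dims N
      = (PySem.List.pyRange 1 (N+1) 1).map
          (fun n => if n = 1 then 1 else partitionNumber (n - 2)) := by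
  unfold heisenberg_bar_dims
  have : (fun (dims : List Int) (n : Int) =>
        if n = 1 then dims ++ [1] else dims ++ [partitionNumber (n - 2)])
      = (fun dims n => dims ++ [if n = 1 then 1 else partitionNumber (n - 2)]) := by
    funext dims n; split <;> rfl
  rw [this, PySem.List.foldl_append_singleton_eq_map]
  simp

-- ===== VERDICT (by name: the statement is the Claim_ definition above) =====
theorem heisenberg_bar_dims_spec : Claim_equal_heisenberg_bar_dims := by
  intro N _
  unfold Spec_heisenberg_bar_dims
  rw [a_fold_map]
  by_cases h0 : N ≤ 0
  · rw [PySem.List.pyRange_one_eq_nil (by omega)]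
    unfold heisenberg_bar_dims_alt
    rw [if_pos h0]
    rfl
  · by_cases h1 : N = 1
    · subst h1
      decide
    · have h2 : 2 ≤ N := by omega
      rw [alt_eq N h2, PySem.List.pyRange_one]
      apply List.ext_getElem
      · simp; omega
      · intro i hi1 hi2
        simp only [List.getElem_map, List.getElem_range]
        match i with
        | 0 => simp
        | Nat.succ i =>
          rw [if_neg (by omega), List.getElem_cons_succ, List.getElem_map,
              List.getElem_range, partitionNumber_eq _ (by omega)]
          congr 1
          omega
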